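-- pv_equiv track=rewrite | github.com/mishu1507/ForensicLensV2 | modules/auth_detector.py | detect_attacks
-- ===== SOURCE A (Python) =====
-- def detect_attacks(events):
--     """Detect attack patterns from parsed events."""
--     attacks = []
--
--     auth_fail_count = sum(1 for e in events if e.get("type") == "AUTH_FAIL")
--     auth_success_count = sum(1 for e in events if e.get("type") == "AUTH_SUCCESS")
--     priv_esc_count = sum(1 for e in events if e.get("type") == "PRIV_ESCALATION")
--
--     if auth_fail_count >= 5:
--         attacks.append("Brute Force Login Attempt")
--
--     if auth_fail_count >= 3 and auth_success_count >= 1: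
--         attacks.append("Credential Compromise Detected")
--
--     if priv_esc_count >= 1:
--         attacks.append("Privilege Escalation Activity")
--
--     for e in events:
--         etype = e.get("type", "")
--         if etype == "USB":
--             attacks.append("Unauthorized USB Usage")
--             break
--
--     for e in events:
--         if e.get("type") == "FILE_COPY":
--             attacks.append("Suspicious File Copy Activity")
--             break
--
--     for e in events:
--         if e.get("type") in ("NETWORK_CONN", "MALWARE_INDICATOR"):
--             attacks.append("Suspicious Network Communication")
--             break
--
--     for e in events:
--         if e.get("type") == "EXECUTION_SUSPICIOUS":
--             attacks.append("Suspicious Command Execution")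
--             break
--
--     for e in events:
--         if e.get("type") == "WEB_ATTACK":
--             attacks.append("Web Application Attack")
--             break
--
--     for e in events:
--         if e.get("type") == "FILE_DELETE":
--             attacks.append("Evidence Tampering / File Deletion")
--             break
--
--     return list(set(attacks))
-- ===== SOURCE B (Python) =====
-- def detect_attacks(events):
--     """Detect attack patterns from parsed events (one-pass count table)."""
--     counts = {}
--     for e in events:
--         t = e.get("type")
--         counts[t] = counts.get(t, 0) + 1
--
--     attacks = []
--     if counts.get("AUTH_FAIL", 0) >= 5:
--         attacks.append("Brute Force Login Attempt")
--     if counts.get("AUTH_FAIL", 0) >= 3 and counts.get("AUTH_SUCCESS", 0) >= 1: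
--         attacks.append("Credential Compromise Detected")
--     if counts.get("PRIV_ESCALATION", 0) >= 1:
--         attacks.append("Privilege Escalation Activity")
--     if counts.get("USB", 0) >= 1:
--         attacks.append("Unauthorized USB Usage")
--     if counts.get("FILE_COPY", 0) >= 1:
--         attacks.append("Suspicious File Copy Activity")
--     if counts.get("NETWORK_CONN", 0) >= 1 or counts.get("MALWARE_INDICATOR", 0) >= 1:
--         attacks.append("Suspicious Network Communication")
--     if counts.get("EXECUTION_SUSPICIOUS", 0) >= 1:
--         attacks.append("Suspicious Command Execution")
--     if counts.get("WEB_ATTACK", 0) >= 1: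
--         attacks.append("Web Application Attack")
--     if counts.get("FILE_DELETE", 0) >= 1:
--         attacks.append("Evidence Tampering / File Deletion")
--     return list(set(attacks))
-- ===== Notes on version B (the rewrite author's own statement) =====
-- stated objective: simpler
-- what changed: B replaces A's three separate counting scans and six separate for/break presence scans (nine passes over events) with a single pass that builds a dict of type-counts, after which every rule is a constant-time table lookup.
import Mathlib
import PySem

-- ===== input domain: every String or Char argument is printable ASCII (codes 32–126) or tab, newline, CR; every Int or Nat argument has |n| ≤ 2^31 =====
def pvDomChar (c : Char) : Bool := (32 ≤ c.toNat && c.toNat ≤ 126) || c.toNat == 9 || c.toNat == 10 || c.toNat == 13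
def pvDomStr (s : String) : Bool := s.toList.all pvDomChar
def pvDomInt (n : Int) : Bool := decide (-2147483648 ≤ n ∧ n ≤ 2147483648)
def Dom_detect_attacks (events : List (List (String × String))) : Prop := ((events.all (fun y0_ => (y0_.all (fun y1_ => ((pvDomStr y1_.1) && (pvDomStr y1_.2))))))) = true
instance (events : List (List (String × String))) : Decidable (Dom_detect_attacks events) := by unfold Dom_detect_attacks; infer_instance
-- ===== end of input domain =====

-- B replaces A's three counting scans and six break-scans by ONE pass building a count table, then table lookups (simpler);
-- both return list(set(attacks)) — the result is compared as a set, the ports use the first-occurrence order.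

-- ===== PORT A =====
-- A: three full counting scans, then six separate for/break presence scans, each appending a label.
def detect_attacks (events : List (List (String × String))) : List String :=
  let auth_fail_count : Int := events.foldl (fun n e => if (PySem.Dict.mk e).get? "type" == some "AUTH_FAIL" then n + 1 else n) 0
  let auth_success_count : Int := events.foldl (fun n e => if (PySem.Dict.mk e).get? "type" == some "AUTH_SUCCESS" then n + 1 else n) 0
  let priv_esc_count : Int := events.foldl (fun n e => if (PySem.Dict.mk e).get? "type" == some "PRIV_ESCALATION" then n + 1 else n) 0
  let attacks : List String := []
  let attacks := if 5 ≤ auth_fail_count then attacks ++ ["Brute Force Login Attempt"] else attacks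
  let attacks := if 3 ≤ auth_fail_count ∧ 1 ≤ auth_success_count then attacks ++ ["Credential Compromise Detected"] else attacks
  let attacks := if 1 ≤ priv_esc_count then attacks ++ ["Privilege Escalation Activity"] else attacks
  -- six for/break scans: 'any' is the first-hit scan
  let attacks := if events.any (fun e => (PySem.Dict.mk e).getD "type" "" == "USB") then attacks ++ ["Unauthorized USB Usage"] else attacks
  let attacks := if events.any (fun e => (PySem.Dict.mk e).get? "type" == some "FILE_COPY") then attacks ++ ["Suspicious File Copy Activity"] else attacks
  let attacks := if events.any (fun e => (PySem.Dict.mk e).get? "type" == some "NETWORK_CONN" || (PySem.Dict.mk e).get? "type" == some "MALWARE_INDICATOR") then attacks ++ ["Suspicious Network Communication"] else attacks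
  let attacks := if events.any (fun e => (PySem.Dict.mk e).get? "type" == some "EXECUTION_SUSPICIOUS") then attacks ++ ["Suspicious Command Execution"] else attacks
  let attacks := if events.any (fun e => (PySem.Dict.mk e).get? "type" == some "WEB_ATTACK") then attacks ++ ["Web Application Attack"] else attacks
  let attacks := if events.any (fun e => (PySem.Dict.mk e).get? "type" == some "FILE_DELETE") then attacks ++ ["Evidence Tampering / File Deletion"] else attacks
  PySem.Set.ofList attacks

-- ===== PORT B =====
-- B: one pass building counts : Dict (Option String) Int, then every rule is a table lookup.
def detect_attacks_alt (events : List (List (String × String))) : List String :=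
  let counts : PySem.Dict (Option String) Int :=
    events.foldl (fun d e => d.insert ((PySem.Dict.mk e).get? "type") (d.getD ((PySem.Dict.mk e).get? "type") 0 + 1)) PySem.Dict.empty
  let attacks : List String := []
  let attacks := if 5 ≤ counts.getD (some "AUTH_FAIL") 0 then attacks ++ ["Brute Force Login Attempt"] else attacks
  let attacks := if 3 ≤ counts.getD (some "AUTH_FAIL") 0 ∧ 1 ≤ counts.getD (some "AUTH_SUCCESS") 0 then attacks ++ ["Credential Compromise Detected"] else attacks
  let attacks := if 1 ≤ counts.getD (some "PRIV_ESCALATION") 0 then attacks ++ ["Privilege Escalation Activity"] else attacks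
  let attacks := if 1 ≤ counts.getD (some "USB") 0 then attacks ++ ["Unauthorized USB Usage"] else attacks
  let attacks := if 1 ≤ counts.getD (some "FILE_COPY") 0 then attacks ++ ["Suspicious File Copy Activity"] else attacks
  let attacks := if 1 ≤ counts.getD (some "NETWORK_CONN") 0 ∨ 1 ≤ counts.getD (some "MALWARE_INDICATOR") 0 then attacks ++ ["Suspicious Network Communication"] else attacks
  let attacks := if 1 ≤ counts.getD (some "EXECUTION_SUSPICIOUS") 0 then attacks ++ ["Suspicious Command Execution"] else attacks
  let attacks := if 1 ≤ counts.getD (some "WEB_ATTACK") 0 then attacks ++ ["Web Application Attack"] else attacks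
  let attacks := if 1 ≤ counts.getD (some "FILE_DELETE") 0 then attacks ++ ["Evidence Tampering / File Deletion"] else attacks
  PySem.Set.ofList attacks

-- ===== PRECONDITION & SPEC =====
def Spec_detect_attacks (events : List (List (String × String))) (out : List String) : Prop := out = detect_attacks_alt events
instance (events : List (List (String × String))) (out : List String) : Decidable (Spec_detect_attacks events out) := by unfold Spec_detect_attacks; infer_instance

-- ===== CLAIM (what is proved, stated in full; the proofs are below) =====
def Claim_equal_detect_attacks : Prop := ∀ (events : List (List (String × String))), Dom_detect_attacks events → Spec_detect_attacks events (detect_attacks events)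

-- ===== LEMMAS AND PROOFS =====

-- the "type" value of one event, as A's and B's code both read it
def pvTy (e : List (String × String)) : Option String := (PySem.Dict.mk e).get? "type"

-- A's counting scan computes the count of (some k) among the type values
theorem pvCountA (events : List (List (String × String))) (k : String) :
    events.foldl (fun n e => if (PySem.Dict.mk e).get? "type" == some k then n + 1 else n) (0 : Int)
      = ((events.map pvTy).count (some k) : Int) := by
  have h : ∀ (n : Int), events.foldl (fun n e => if (PySem.Dict.mk e).get? "type" == some k then n + 1 else n) n
      = n + ((events.map pvTy).count (some k) : Int) := by
    induction events with
    | nil => intro n; simp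
    | cons e es ih =>
      intro n
      simp only [List.foldl_cons, List.map_cons, ih, pvTy, List.count_cons]
      by_cases h : (PySem.Dict.mk e).get? "type" = some k
      · simp [h]; ring
      · simp [h]
  simpa using h 0

-- B's table lookup computes the same count
theorem pvCountB (events : List (List (String × String))) (k : String) :
    (events.foldl (fun d e => d.insert ((PySem.Dict.mk e).get? "type") (d.getD ((PySem.Dict.mk e).get? "type") 0 + 1)) PySem.Dict.empty).getD (some k) 0
      = ((events.map pvTy).count (some k) : Int) := by
  have h : ∀ d : PySem.Dict (Option String) Int,
      (events.foldl (fun d e => d.insert ((PySem.Dict.mk e).get? "type") (d.getD ((PySem.Dict.mk e).get? "type") 0 + 1)) d).getD (some k) 0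
        = d.getD (some k) 0 + ((events.map pvTy).count (some k) : Int) := by
    induction events with
    | nil => intro d; simp
    | cons e es ih =>
      intro d
      simp only [List.foldl_cons, List.map_cons, List.count_cons, ih, pvTy, PySem.Dict.getD_insert]
      by_cases h : some k = (PySem.Dict.mk e).get? "type"
      · simp only [← h, beq_self_eq_true, if_true]; push_cast; ring
      · simp [h]
        exact fun hh => h hh.symm
  simpa using h PySem.Dict.empty

-- A's for/break presence scan ↔ count ≥ 1
theorem pvAnyCount (events : List (List (String × String))) (k : String) :
    (events.any (fun e => (PySem.Dict.mk e).get? "type" == some k) = true)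
      ↔ (1 ≤ ((events.map pvTy).count (some k) : Int)) := by
  simp only [List.any_eq_true, beq_iff_eq]
  rw [show (1 : Int) ≤ ((events.map pvTy).count (some k) : Int) ↔ 0 < (events.map pvTy).count (some k) by omega]
  rw [List.count_pos_iff]
  constructor
  · rintro ⟨e, he, hk⟩; exact List.mem_map.mpr ⟨e, he, hk⟩
  · rintro hm; rcases List.mem_map.mp hm with ⟨e, he, hk⟩; exact ⟨e, he, hk⟩

-- the USB scan compares getD "type" "" against "USB"; same as get? = some "USB"
theorem pvUSBpred (e : List (String × String)) :
    ((PySem.Dict.mk e).getD "type" "" == "USB") = ((PySem.Dict.mk e).get? "type" == some "USB") := by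
  rw [PySem.Dict.getD_eq_get?_getD]
  cases h : (PySem.Dict.mk e).get? "type" <;> simp

theorem pvAnyUSB (events : List (List (String × String))) :
    (events.any (fun e => (PySem.Dict.mk e).getD "type" "" == "USB") = true)
      ↔ (1 ≤ ((events.map pvTy).count (some "USB") : Int)) := by
  rw [show (fun e => (PySem.Dict.mk e).getD "type" "" == "USB") = (fun e => (PySem.Dict.mk e).get? "type" == some "USB") from funext pvUSBpred]
  exact pvAnyCount events "USB"

-- the NETWORK scan's two-way membership splits into two presence checks
theorem pvAnyNet (events : List (List (String × String))) :
    (events.any (fun e => (PySem.Dict.mk e).get? "type" == some "NETWORK_CONN" || (PySem.Dict.mk e).get? "type" == some "MALWARE_INDICATOR") = true)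
      ↔ (1 ≤ ((events.map pvTy).count (some "NETWORK_CONN") : Int) ∨ 1 ≤ ((events.map pvTy).count (some "MALWARE_INDICATOR") : Int)) := by
  rw [← pvAnyCount events "NETWORK_CONN", ← pvAnyCount events "MALWARE_INDICATOR"]
  simp only [List.any_eq_true, beq_iff_eq, Bool.or_eq_true]
  constructor
  · rintro ⟨e, he, h | h⟩
    · exact Or.inl ⟨e, he, h⟩
    · exact Or.inr ⟨e, he, h⟩
  · rintro (⟨e, he, h⟩ | ⟨e, he, h⟩)
    · exact ⟨e, he, Or.inl h⟩
    · exact ⟨e, he, Or.inr h⟩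

-- ===== VERDICT (by name: the statement is the Claim_ definition above) =====
theorem detect_attacks_spec : Claim_equal_detect_attacks := by
  intro events _
  show detect_attacks events = detect_attacks_alt events
  unfold detect_attacks detect_attacks_alt
  simp only [pvCountA, pvCountB, pvAnyCount, pvAnyUSB, pvAnyNet]
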